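-- pv_equiv track=rewrite | github.com/MysticVagabond/PythonDev | Project Files/Encrypter_V3/Decrypter_3_1.py | fourLetterMultiple
-- ===== SOURCE A (Python) =====
-- def fourLetterMultiple(word):    #rfuo four
--     oldWord = ''
--     for sectNum in range(int(len(word)/4)):
--         oldWord += word[1+(sectNum*4)]
--         oldWord += word[3+(sectNum*4)]
--         oldWord += word[2+(sectNum*4)]
--         oldWord += word[0+(sectNum*4)]
--     return (oldWord)
-- ===== SOURCE B (Python) =====
-- def fourLetterMultiple(word):
--     # Four strided character streams zipped block-wise; zip's shortest-stream
--     # stopping drops any trailing partial block, like A's int(len/4) loop bound.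
--     return ''.join(a + b + c + d
--                    for a, b, c, d in zip(word[1::4], word[3::4], word[2::4], word[0::4]))
-- ===== Notes on version B (the rewrite author's own statement) =====
-- stated objective: idiomatic
-- what changed: Replaces the per-block index-arithmetic loop with repeated string += by four strided slices zipped in parallel and one join, zip's shortest-stream rule handling the trailing partial block.
import Mathlib
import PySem

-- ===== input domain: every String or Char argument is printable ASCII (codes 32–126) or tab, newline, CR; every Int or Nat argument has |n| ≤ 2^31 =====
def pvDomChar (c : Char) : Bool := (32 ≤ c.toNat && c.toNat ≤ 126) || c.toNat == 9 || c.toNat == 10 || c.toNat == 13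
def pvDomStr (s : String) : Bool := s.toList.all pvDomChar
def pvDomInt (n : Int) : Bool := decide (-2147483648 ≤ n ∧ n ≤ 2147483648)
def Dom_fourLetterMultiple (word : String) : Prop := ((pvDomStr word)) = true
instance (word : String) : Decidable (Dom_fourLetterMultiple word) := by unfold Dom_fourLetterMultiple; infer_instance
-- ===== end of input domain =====

-- B replaces A's per-block index-arithmetic loop by four strided character streams
-- zipped in parallel and joined (idiomatic decomposition; zip drops the partial block).


-- ===== PORT A =====
-- Literal port of A: loop sectNum over range(len(word)/4), appending the four
-- characters of each block in order 1,3,2,0.  Every index 4*sectNum+i with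
-- i ≤ 3 is provably < len(word), so Python's word[idx] never raises and the
-- total getD form is exact; int(len/4) on a nonnegative length is Nat division.
def fourLetterMultiple (word : String) : String :=
  let cs := word.toList
  String.mk ((List.range (cs.length / 4)).foldl
    (fun acc k => acc ++ [cs.getD (1 + 4 * k) ' ', cs.getD (3 + 4 * k) ' ',
                          cs.getD (2 + 4 * k) ' ', cs.getD (0 + 4 * k) ' ']) [])

-- ===== PORT B =====
-- word[i::4]: every fourth element, structurally (exact for Python's step-4 slice)
def stride4 {α : Type} : List α → List α
  | [] => []
  | [a] => [a]
  | [a, _] => [a]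
  | [a, _, _] => [a]
  | a :: _ :: _ :: _ :: rest => a :: stride4 rest

def fourLetterMultiple_alt (word : String) : String :=
  let cs := word.toList
  String.mk ((((stride4 (cs.drop 1)).zip (stride4 (cs.drop 3))).zip
              ((stride4 (cs.drop 2)).zip (stride4 cs))).flatMap
    (fun p => [p.1.1, p.1.2, p.2.1, p.2.2]))

-- ===== PRECONDITION & SPEC =====
def Spec_fourLetterMultiple (word : String) (out : String) : Prop := out = fourLetterMultiple_alt word
instance (word : String) (out : String) : Decidable (Spec_fourLetterMultiple word out) := by unfold Spec_fourLetterMultiple; infer_instance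

-- ===== CLAIM (what is proved, stated in full; the proofs are below) =====
def Claim_equal_fourLetterMultiple : Prop := ∀ (word : String), Dom_fourLetterMultiple word → Spec_fourLetterMultiple word (fourLetterMultiple word)

-- ===== LEMMAS AND PROOFS =====
theorem stride4_cons {α : Type} (x : α) (l : List α) :
    stride4 (x :: l) = x :: stride4 (l.drop 3) := by
  match l with
  | [] => rfl
  | [_] => rfl
  | [_, _] => rfl
  | _ :: _ :: _ :: _ => rfl

theorem key (cs : List Char) :
    (List.range (cs.length / 4)).flatMap
      (fun k => [cs.getD (1 + 4 * k) ' ', cs.getD (3 + 4 * k) ' ',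
                 cs.getD (2 + 4 * k) ' ', cs.getD (0 + 4 * k) ' '])
    = (((stride4 (cs.drop 1)).zip (stride4 (cs.drop 3))).zip
        ((stride4 (cs.drop 2)).zip (stride4 cs))).flatMap
        (fun p => [p.1.1, p.1.2, p.2.1, p.2.2]) := by
  match cs with
  | [] => rfl
  | [a] => simp [stride4]
  | [a, b] => simp [stride4]
  | [a, b, c] => simp [stride4]
  | a :: b :: c :: d :: rest =>
    have ih := key rest
    have hlen : (a :: b :: c :: d :: rest).length / 4 = rest.length / 4 + 1 := by
      simp [List.length]; omega
    have hsh : ∀ k : Nat, ∀ _ : k ∈ List.range (rest.length / 4),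
        [(a :: b :: c :: d :: rest).getD (1 + 4 * Nat.succ k) ' ',
         (a :: b :: c :: d :: rest).getD (3 + 4 * Nat.succ k) ' ',
         (a :: b :: c :: d :: rest).getD (2 + 4 * Nat.succ k) ' ',
         (a :: b :: c :: d :: rest).getD (0 + 4 * Nat.succ k) ' ']
        = [rest.getD (1 + 4 * k) ' ', rest.getD (3 + 4 * k) ' ',
           rest.getD (2 + 4 * k) ' ', rest.getD (0 + 4 * k) ' '] := by
      intro k _
      have h1 : 1 + 4 * Nat.succ k = (1 + 4 * k) + 4 := by omega
      have h3 : 3 + 4 * Nat.succ k = (3 + 4 * k) + 4 := by omega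
      have h2 : 2 + 4 * Nat.succ k = (2 + 4 * k) + 4 := by omega
      have h0 : 0 + 4 * Nat.succ k = (0 + 4 * k) + 4 := by omega
      rw [h1, h3, h2, h0]
      rfl
    rw [hlen, List.range_succ_eq_map, List.flatMap_cons, List.flatMap_map,
        List.flatMap_congr hsh]
    have hd1 : (a :: b :: c :: d :: rest).drop 1 = b :: c :: d :: rest := rfl
    have hd3 : (a :: b :: c :: d :: rest).drop 3 = d :: rest := rfl
    have hd2 : (a :: b :: c :: d :: rest).drop 2 = c :: d :: rest := rfl
    rw [hd1, hd3, hd2,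
        stride4_cons b (c :: d :: rest), stride4_cons d rest,
        stride4_cons c (d :: rest), stride4_cons a (b :: c :: d :: rest)]
    have e1 : (c :: d :: rest).drop 3 = rest.drop 1 := by
      cases rest with | nil => rfl | cons x xs => rfl
    have e2 : (d :: rest).drop 3 = rest.drop 2 := by
      cases rest with
      | nil => rfl
      | cons x xs => cases xs with | nil => rfl | cons y ys => rfl
    have e0 : (b :: c :: d :: rest).drop 3 = rest := rfl
    rw [e1, e2, e0, List.zip_cons_cons, List.zip_cons_cons, List.zip_cons_cons,
        List.flatMap_cons, ← ih]
    rfl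

-- ===== VERDICT (by name: the statement is the Claim_ definition above) =====
theorem fourLetterMultiple_spec : Claim_equal_fourLetterMultiple := by
  intro word _
  unfold Spec_fourLetterMultiple fourLetterMultiple fourLetterMultiple_alt
  simp only [PySem.List.foldl_append_eq_flatMap, List.nil_append]
  rw [key]
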